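-- pv_equiv track=rewrite | github.com/tasleson/boom | boom/__init__.py | _key_regex_from_format
-- ===== SOURCE A (Python) =====
-- FMT_VERSION = "version"
--
-- FMT_LVM_ROOT_LV = "lvm_root_lv"
--
-- FMT_BTRFS_SUBVOLUME = "btrfs_subvolume"
--
-- FMT_BTRFS_SUBVOL_ID = "btrfs_subvol_id"
--
-- FMT_BTRFS_SUBVOL_PATH = "btrfs_subvol_path"
--
-- FMT_ROOT_DEVICE = "root_device"
--
-- FMT_ROOT_OPTS = "root_opts"
--
-- FORMAT_KEYS = [
--     FMT_VERSION,
--     FMT_LVM_ROOT_LV,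
--     FMT_BTRFS_SUBVOL_ID, FMT_BTRFS_SUBVOL_PATH,
--     FMT_BTRFS_SUBVOLUME,
--     FMT_ROOT_DEVICE, FMT_ROOT_OPTS
-- ]
--
-- def _key_regex_from_format(fmt, capture=False):
--     """_key_regex_from_format(self, fmt) -> str
--
--         Generate a regular expression to match formatted instances
--         of format string ``fmt``. The expression is constructed by
--         replacing all format keys with the pattern ".*".
--
--         If the ``capture`` argument is True, capture groups will
--         be inserted around each replaced substitution.
--
--         :param fmt: The format string to build an expression from.
--         :returns: A regular expression matching instances of
--                   ``fmt``.
--         :returntype: str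
--     """
--     key_format = "%%{%s}"
--     regex_all = "(\S*)" if capture else "\S*"
--
--     def _make_key_regex(spaces=0):
--         regex = r'(' if capture else r''
--         regex += r'\S*'
--         while spaces:
--             regex += r' ?\S*'
--             spaces -= 1
--         regex += r')' if capture else r''
--         return regex
--
--     if not fmt:
--         return ""
--
--     _key_spaces = {
--         FMT_VERSION: 0,
--         FMT_LVM_ROOT_LV: 0,
--         FMT_BTRFS_SUBVOL_ID: 0,
--         FMT_BTRFS_SUBVOL_PATH: 0,
--         FMT_BTRFS_SUBVOLUME: 0,
--         FMT_ROOT_DEVICE: 0,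
--         FMT_ROOT_OPTS: 1
--     }
--
--     for key in FORMAT_KEYS:
--         if key in fmt:
--             regex = _make_key_regex(spaces=_key_spaces[key])
--             key = key_format % key
--             fmt = fmt.replace(key, regex)
--
--     # Ignore whitespace variations
--     out_fmt = ""
--     for word in fmt.split():
--         out_fmt += word + "\s*"
--
--     return out_fmt
-- ===== SOURCE B (Python) =====
-- FMT_VERSION = "version"
-- FMT_LVM_ROOT_LV = "lvm_root_lv"
-- FMT_BTRFS_SUBVOLUME = "btrfs_subvolume"
-- FMT_BTRFS_SUBVOL_ID = "btrfs_subvol_id"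
-- FMT_BTRFS_SUBVOL_PATH = "btrfs_subvol_path"
-- FMT_ROOT_DEVICE = "root_device"
-- FMT_ROOT_OPTS = "root_opts"
--
-- FORMAT_KEYS = [
--     FMT_VERSION,
--     FMT_LVM_ROOT_LV,
--     FMT_BTRFS_SUBVOL_ID, FMT_BTRFS_SUBVOL_PATH,
--     FMT_BTRFS_SUBVOLUME,
--     FMT_ROOT_DEVICE, FMT_ROOT_OPTS
-- ]
--
--
-- def _key_regex_from_format(fmt, capture=False):
--     """Single-pass re-implementation: one table lookup per '%{...}' occurrence
--     instead of seven replace scans over the whole string."""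
--     if not fmt:
--         return ""
--
--     table = {
--         key: (("(" if capture else "")
--               + "\\S*"
--               + (" ?\\S*" if key == FMT_ROOT_OPTS else "")
--               + (")" if capture else ""))
--         for key in FORMAT_KEYS
--     }
--
--     out = []
--     i = 0
--     n = len(fmt)
--     while i < n:
--         if fmt.startswith("%{", i):
--             j = fmt.find("}", i + 2)
--             if j != -1 and fmt[i + 2:j] in table:
--                 out.append(table[fmt[i + 2:j]])
--                 i = j + 1
--                 continue
--         out.append(fmt[i])
--         i += 1
--     sub = "".join(out)
--
--     return "".join(word + "\\s*" for word in sub.split())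
-- ===== Notes on version B (the rewrite author's own statement) =====
-- stated objective: alternative
-- what changed: Replaces the seven key-by-key str.replace scans with one key->regex table and a single left-to-right scan of fmt that substitutes each format-key reference on sight (then the same whitespace normalization).
import Mathlib
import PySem

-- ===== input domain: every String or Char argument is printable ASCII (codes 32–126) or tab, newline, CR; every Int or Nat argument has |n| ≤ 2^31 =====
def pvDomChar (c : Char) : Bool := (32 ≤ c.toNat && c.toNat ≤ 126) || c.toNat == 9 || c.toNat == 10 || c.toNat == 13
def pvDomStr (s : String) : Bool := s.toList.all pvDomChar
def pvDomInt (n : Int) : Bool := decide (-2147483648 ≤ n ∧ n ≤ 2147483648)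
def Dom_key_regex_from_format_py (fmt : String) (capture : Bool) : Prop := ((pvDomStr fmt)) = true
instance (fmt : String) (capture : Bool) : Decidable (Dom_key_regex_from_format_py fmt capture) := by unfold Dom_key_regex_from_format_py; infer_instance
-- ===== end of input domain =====

-- B replaces A's seven key-by-key str.replace scans by one key->regex table and a single
-- left-to-right scan substituting each format-key reference on sight (objective: alternative).

-- ===== PORT A =====

-- module constant FORMAT_KEYS (same-module context shared by both implementations)
def pvFormatKeys : List (List Char) :=
  ["version".toList, "lvm_root_lv".toList,
   "btrfs_subvol_id".toList, "btrfs_subvol_path".toList,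
   "btrfs_subvolume".toList,
   "root_device".toList, "root_opts".toList]

-- the _key_spaces dict of A (all values 0 except root_opts: 1)
def pvKeySpaces : PySem.Dict (List Char) Nat :=
  PySem.Dict.ofList
    [("version".toList, 0), ("lvm_root_lv".toList, 0),
     ("btrfs_subvol_id".toList, 0), ("btrfs_subvol_path".toList, 0),
     ("btrfs_subvolume".toList, 0),
     ("root_device".toList, 0), ("root_opts".toList, 1)]

-- the 'while spaces: regex += " ?\S*"; spaces -= 1' loop of _make_key_regex
def pvSpacesLoop : Nat → List Char
  | 0 => []
  | n + 1 => [' ', '?', '\\', 'S', '*'] ++ pvSpacesLoop n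

-- _make_key_regex(spaces): optional '(' , then '\S*', the while-loop, optional ')'
def pvMakeKeyRegex (capture : Bool) (spaces : Nat) : List Char :=
  (((if capture then ['('] else []) ++ ['\\', 'S', '*']) ++ pvSpacesLoop spaces) ++
    (if capture then [')'] else [])

-- body of A on the character list; "%%{%s}" % key is the literal '%{' ++ key ++ '}';
-- _key_spaces[key] is ported as get?.getD 0, exact because every FORMAT_KEYS key is present
def pvCoreA (fmt : List Char) (capture : Bool) : List Char :=
  if fmt = [] then [] else
    (PySem.Chars.split₀
      (pvFormatKeys.foldl
        (fun f key =>
          if PySem.Chars.isIn key f then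
            PySem.Chars.replace f ('%' :: '{' :: (key ++ ['}']))
              (pvMakeKeyRegex capture ((pvKeySpaces.get? key).getD 0))
          else f) fmt)).foldl (fun out word => out ++ (word ++ ['\\', 's', '*'])) []

def key_regex_from_format_py (fmt : String) (capture : Bool) : String :=
  String.ofList (pvCoreA fmt.toList capture)

-- ===== PORT B =====

-- B's key -> regex table (the dict comprehension over FORMAT_KEYS)
def pvTableB (capture : Bool) : PySem.Dict (List Char) (List Char) :=
  PySem.Dict.ofList (pvFormatKeys.map (fun key =>
    (key, (if capture then ['('] else []) ++ ['\\', 'S', '*'] ++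
          (if key = "root_opts".toList then [' ', '?', '\\', 'S', '*'] else []) ++
          (if capture then [')'] else []))))

-- B's scanning loop: at '%{' read up to the next '}' (fmt.find('}', i+2) and the slice
-- fmt[i+2:j], ported as dropWhile/takeWhile) and substitute the table entry when the
-- enclosed text is a table key; otherwise copy a single character and continue.
def pvScanB (tbl : PySem.Dict (List Char) (List Char)) : List Char → List Char
  | [] => []
  | c :: rest =>
    if c = '%' then
      match rest with
      | '{' :: rs =>
        (match hdw : rs.dropWhile (fun d => d != '}') with
         | '}' :: tail =>
           if tbl.contains (rs.takeWhile (fun d => d != '}')) then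
             tbl.getD (rs.takeWhile (fun d => d != '}')) [] ++ pvScanB tbl tail
           else c :: pvScanB tbl ('{' :: rs)
         | _ => c :: pvScanB tbl ('{' :: rs))
      | r2 => c :: pvScanB tbl r2
    else c :: pvScanB tbl rest
termination_by l => l.length
decreasing_by
  · have h1 : (rs.dropWhile (fun d => d != '}')).length ≤ rs.length :=
      List.length_dropWhile_le _ _
    rw [hdw] at h1
    simp at h1 ⊢
    omega
  all_goals simp

-- body of B on the character list ("".join(word + "\s*" for word in sub.split()))
def pvCoreB (fmt : List Char) (capture : Bool) : List Char :=
  if fmt = [] then [] else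
    PySem.Chars.join []
      ((PySem.Chars.split₀ (pvScanB (pvTableB capture) fmt)).map
        (fun w => w ++ ['\\', 's', '*']))

def key_regex_from_format_py_alt (fmt : String) (capture : Bool) : String :=
  String.ofList (pvCoreB fmt.toList capture)

-- ===== PRECONDITION & SPEC =====
def Spec_key_regex_from_format_py (fmt : String) (capture : Bool) (out : String) : Prop := out = key_regex_from_format_py_alt fmt capture
instance (fmt : String) (capture : Bool) (out : String) : Decidable (Spec_key_regex_from_format_py fmt capture out) := by unfold Spec_key_regex_from_format_py; infer_instance

-- ===== CLAIM (what is proved, stated in full; the proofs are below) =====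
def Claim_equal_key_regex_from_format_py : Prop := ∀ (fmt : String) (capture : Bool), Dom_key_regex_from_format_py fmt capture → Spec_key_regex_from_format_py fmt capture (key_regex_from_format_py fmt capture)

-- ===== LEMMAS AND PROOFS =====

def pvRepF (old new : List Char) : List Char → List Char
  | [] => []
  | c :: t =>
    if old.isPrefixOf (c :: t) then new ++ pvRepF old new (List.drop (old.length - 1) t)
    else c :: pvRepF old new t
termination_by l => l.length
decreasing_by
  all_goals simp [List.length_drop]


theorem pvRepF_go_eq (old new : List Char) (h : old ≠ []) :
    ∀ fuel l acc, l.length ≤ fuel →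
      PySem.Chars.replace.go old new fuel l acc = acc.reverse ++ pvRepF old new l := by
  intro fuel
  induction fuel with
  | zero =>
    intro l acc hl
    have : l = [] := List.length_eq_zero_iff.mp (Nat.le_zero.mp hl)
    subst this
    simp [PySem.Chars.replace.go, pvRepF]
  | succ n ih =>
    intro l acc hl
    cases l with
    | nil => simp [PySem.Chars.replace.go, pvRepF]
    | cons c t =>
      rw [PySem.Chars.replace.go]
      by_cases hp : old.isPrefixOf (c :: t)
      · rw [if_pos hp]
        obtain ⟨o, ot, rfl⟩ : ∃ o ot, old = o :: ot := by
          cases old with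
          | nil => exact absurd rfl h
          | cons o ot => exact ⟨o, ot, rfl⟩
        have hdrop : List.drop (o :: ot).length (c :: t) = List.drop ((o :: ot).length - 1) t := by
          simp
        rw [hdrop]
        rw [ih _ _ (by simp at hl ⊢; omega)]
        rw [pvRepF]
        rw [if_pos hp]
        simp
      · rw [if_neg hp]
        rw [ih _ _ (by simp at hl; omega)]
        rw [pvRepF, if_neg hp]
        simp

theorem pvReplace_eq_repF (s old new : List Char) (h : old ≠ []) :
    PySem.Chars.replace s old new = pvRepF old new s := by
  rw [PySem.Chars.replace]
  rw [if_neg (by simpa [List.isEmpty_iff] using h)]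
  rw [pvRepF_go_eq old new h s.length s [] (le_refl _)]
  simp

theorem pvRepF_nil (old new : List Char) : pvRepF old new [] = [] := by rw [pvRepF]

theorem pvRepF_prefix (old new u : List Char) (h : old ≠ []) :
    pvRepF old new (old ++ u) = new ++ pvRepF old new u := by
  obtain ⟨o, ot, rfl⟩ : ∃ o ot, old = o :: ot := by
    cases old with
    | nil => exact absurd rfl h
    | cons o ot => exact ⟨o, ot, rfl⟩
  rw [show (o :: ot) ++ u = o :: (ot ++ u) by simp]
  rw [pvRepF]
  rw [if_pos (by rw [List.isPrefixOf_iff_prefix]; exact ⟨u, by simp⟩)]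
  congr 1
  congr 1
  simp

theorem pvRepF_cons_neg (old new : List Char) (c : Char) (t : List Char)
    (h : ¬ old <+: (c :: t)) :
    pvRepF old new (c :: t) = c :: pvRepF old new t := by
  rw [pvRepF, if_neg (by rw [List.isPrefixOf_iff_prefix]; exact h)]

theorem pvRepF_eq_self (old new : List Char) (h : old ≠ []) :
    ∀ s, ¬ old <:+: s → pvRepF old new s = s := by
  intro s
  induction s with
  | nil => intro _; exact pvRepF_nil _ _
  | cons c t ih =>
    intro hinf
    rw [pvRepF_cons_neg _ _ _ _ (fun hp => hinf hp.isInfix)]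
    rw [ih (fun hi => hinf (hi.trans (List.suffix_cons c t).isInfix))]

theorem pvRepF_append_head_notin (o : Char) (ot new : List Char) :
    ∀ p x, o ∉ p →
      pvRepF (o :: ot) new (p ++ x) = p ++ pvRepF (o :: ot) new x := by
  intro p
  induction p with
  | nil => intro x _; simp
  | cons c p' ih =>
    intro x ho
    rw [show (c :: p') ++ x = c :: (p' ++ x) by simp]
    rw [pvRepF_cons_neg _ _ _ _ (by
      intro hp
      rw [List.cons_prefix_cons] at hp
      exact ho (by simp [hp.1]))]
    rw [ih x (fun hm => ho (by simp [hm]))]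
    simp

-- a prefix of the output of replace whose characters avoid the replacement text
-- is a prefix of the input
theorem pvRepF_prefix_rev (old new : List Char) (hold : old ≠ []) (hnew : new ≠ []) :
    ∀ s q, q <+: pvRepF old new s → (∀ c ∈ q, c ∉ new) → q <+: s := by
  intro s
  induction hn : s.length using Nat.strong_induction_on generalizing s with
  | _ n ih =>
  subst hn
  cases s with
  | nil => intro q hq _; rw [pvRepF_nil] at hq; simpa using hq
  | cons c t =>
    intro q hq hdisj
    by_cases hp : old.isPrefixOf (c :: t)
    · rw [pvRepF, if_pos hp] at hq
      cases q with
      | nil => exact List.nil_prefix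
      | cons d q' =>
        exfalso
        obtain ⟨nh, nt, rfl⟩ : ∃ nh nt, new = nh :: nt := by
          cases new with
          | nil => exact absurd rfl hnew
          | cons nh nt => exact ⟨nh, nt, rfl⟩
        simp only [List.cons_append] at hq
        rw [List.cons_prefix_cons] at hq
        exact hdisj d (by simp) (by simp [hq.1])
    · rw [pvRepF, if_neg hp] at hq
      cases q with
      | nil => exact List.nil_prefix
      | cons d q' =>
        rw [List.cons_prefix_cons] at hq
        have := ih t.length (by simp) t rfl q' hq.2
          (fun c hc => hdisj c (by simp [hc]))
        rw [hq.1]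
        exact List.cons_prefix_cons.mpr ⟨rfl, this⟩

-- keys without '}' are determined by their brace-terminated token
theorem pvKeyBrace : ∀ (a b x : List Char), (∀ c ∈ a, c ≠ '}') → (∀ c ∈ b, c ≠ '}') →
    (a ++ ['}']) <+: (b ++ ['}']) ++ x → a = b := by
  intro a
  induction a with
  | nil =>
    intro b x _ hb hp
    cases b with
    | nil => rfl
    | cons d b' =>
      exfalso
      rw [show ((d :: b') ++ ['}']) ++ x = d :: ((b' ++ ['}']) ++ x) by simp] at hp
      rw [show ([] : List Char) ++ ['}'] = '}' :: [] by simp] at hp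
      rw [List.cons_prefix_cons] at hp
      exact hb d (by simp) hp.1.symm
  | cons c a' ih =>
    intro b x ha hb hp
    cases b with
    | nil =>
      exfalso
      rw [show (c :: a') ++ ['}'] = c :: (a' ++ ['}']) by simp] at hp
      rw [show (([] : List Char) ++ ['}']) ++ x = '}' :: x by simp] at hp
      rw [List.cons_prefix_cons] at hp
      exact ha c (by simp) hp.1
    | cons d b' =>
      rw [show (c :: a') ++ ['}'] = c :: (a' ++ ['}']) by simp,
          show ((d :: b') ++ ['}']) ++ x = d :: ((b' ++ ['}']) ++ x) by simp,
          List.cons_prefix_cons] at hp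
      have := ih b' x (fun c hc => ha c (by simp [hc])) (fun c hc => hb c (by simp [hc])) hp.2
      rw [hp.1, this]


def pvTok (k : List Char) : List Char := '%' :: '{' :: (k ++ ['}'])

def pvFoldRep (K : List (List Char × List Char)) (s : List Char) : List Char :=
  K.foldl (fun f p => pvRepF (pvTok p.1) p.2 f) s

def pvGoodK (K : List (List Char × List Char)) : Prop :=
  (∀ p ∈ K, p.1 ≠ [] ∧ ∀ c ∈ p.1, c ≠ '}' ∧ c ≠ '%') ∧
  (∀ p ∈ K, p.2 ≠ [] ∧ ∀ c ∈ p.2, c ≠ '%' ∧ c ≠ '{' ∧ c ≠ '}' ∧ ∀ q ∈ K, c ∉ q.1) ∧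
  (K.map Prod.fst).Nodup


theorem pvGoodK_cons (p : List Char × List Char) (K : List (List Char × List Char))
    (h : pvGoodK (p :: K)) : pvGoodK K := by
  obtain ⟨h1, h2, h3⟩ := h
  simp only [List.map_cons, List.nodup_cons] at h3
  refine ⟨fun q hq => h1 q (by simp [hq]), fun q hq => ?_, h3.2⟩
  obtain ⟨hne, hc⟩ := h2 q (by simp [hq])
  exact ⟨hne, fun c hcq => ⟨(hc c hcq).1, (hc c hcq).2.1, (hc c hcq).2.2.1,
    fun r hr => (hc c hcq).2.2.2 r (by simp [hr])⟩⟩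

-- a token of key a is never a prefix of (token of key b) ++ x for different keys
theorem pvTokNotPrefix (a b x : List Char) (hab : a ≠ b)
    (ha : ∀ c ∈ a, c ≠ '}') (hb : ∀ c ∈ b, c ≠ '}') :
    ¬ pvTok a <+: pvTok b ++ x := by
  intro hp
  simp only [pvTok, List.cons_append] at hp
  rw [List.cons_prefix_cons] at hp
  obtain ⟨-, hp2⟩ := hp
  rw [List.cons_prefix_cons] at hp2
  exact hab (pvKeyBrace a b x ha hb hp2.2)

-- a step for a different key commutes with a token at the front
theorem pvStepTokFront (a b r x : List Char) (hab : a ≠ b)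
    (ha : ∀ c ∈ a, c ≠ '}') (hb : ∀ c ∈ b, c ≠ '}' ∧ c ≠ '%') :
    pvRepF (pvTok a) r (pvTok b ++ x) = pvTok b ++ pvRepF (pvTok a) r x := by
  rw [show pvTok b ++ x = '%' :: (('{' :: (b ++ ['}'])) ++ x) by simp [pvTok]]
  rw [pvRepF_cons_neg _ _ _ _ (by
    intro hp
    exact pvTokNotPrefix a b x hab ha (fun c hc => (hb c hc).1) (by simpa [pvTok] using hp))]
  rw [show pvTok a = '%' :: ('{' :: (a ++ ['}'])) by simp [pvTok]]
  rw [pvRepF_append_head_notin '%' _ r _ x (by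
    simp only [List.mem_cons, List.mem_append, List.mem_singleton]
    rintro (h | h | h)
    · exact absurd h (by decide)
    · exact (hb _ h).2 rfl
    · exact absurd h (by decide))]
  simp [pvTok]

-- a step commutes with replacement text at the front
theorem pvStepRepFront (a r rp x : List Char) (hrp : '%' ∉ rp) :
    pvRepF (pvTok a) r (rp ++ x) = rp ++ pvRepF (pvTok a) r x := by
  rw [show pvTok a = '%' :: ('{' :: (a ++ ['}'])) by simp [pvTok]]
  exact pvRepF_append_head_notin '%' _ r rp x hrp

theorem pvFoldRep_nil (K : List (List Char × List Char)) : pvFoldRep K [] = [] := by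
  induction K with
  | nil => rfl
  | cons p K ih => simp only [pvFoldRep, List.foldl_cons, pvRepF_nil]; exact ih

theorem pvFoldRep_repFront (K : List (List Char × List Char)) :
    ∀ rp x, '%' ∉ rp → pvFoldRep K (rp ++ x) = rp ++ pvFoldRep K x := by
  induction K with
  | nil => intro rp x _; simp [pvFoldRep]
  | cons p K ih =>
    intro rp x hrp
    simp only [pvFoldRep, List.foldl_cons]
    rw [pvStepRepFront p.1 p.2 rp x hrp]
    exact ih rp _ hrp

theorem pvFoldRep_tokFront (K : List (List Char × List Char)) (hK : pvGoodK K)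
    (k r : List Char) (hmem : (k, r) ∈ K) :
    ∀ u, pvFoldRep K (pvTok k ++ u) = r ++ pvFoldRep K u := by
  induction K with
  | nil => simp at hmem
  | cons p K ih =>
    intro u
    by_cases hpk : p.1 = k
    · have hpr : p = (k, r) := by
        rcases List.mem_cons.mp hmem with h | h
        · exact h.symm
        · exfalso
          have : k ∈ K.map Prod.fst := List.mem_map.mpr ⟨(k, r), h, rfl⟩
          have hnd := hK.2.2
          simp only [List.map_cons, List.nodup_cons] at hnd
          exact hnd.1 (hpk ▸ this)
      subst hpr
      simp only [pvFoldRep, List.foldl_cons]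
      rw [pvRepF_prefix _ _ _ (by simp [pvTok])]
      have hr : '%' ∉ r := by
        intro hc
        exact ((hK.2.1 (k, r) (by simp)).2 '%' hc).1 rfl
      rw [show (List.foldl (fun f p => pvRepF (pvTok p.1) p.2 f) (r ++ pvRepF (pvTok k) r u) K)
            = pvFoldRep K (r ++ pvRepF (pvTok k) r u) from rfl]
      rw [pvFoldRep_repFront K r _ hr]
      rfl
    · have hmem' : (k, r) ∈ K := by
        rcases List.mem_cons.mp hmem with h | h
        · exact absurd (by rw [← h]) hpk
        · exact h
      simp only [pvFoldRep, List.foldl_cons]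
      rw [pvStepTokFront p.1 k p.2 u hpk
        (fun c hc => ((hK.1 p (by simp)).2 c hc).1)
        (fun c hc => (hK.1 (k, r) (by simp [hmem'])).2 c hc)]
      exact ih (pvGoodK_cons p K hK) hmem' _

theorem pvFoldRep_consFront (c : Char) (K : List (List Char × List Char)) (hK : pvGoodK K) :
    ∀ y, (∀ p ∈ K, ¬ pvTok p.1 <+: c :: y) →
      pvFoldRep K (c :: y) = c :: pvFoldRep K y := by
  induction K with
  | nil => intro y _; simp [pvFoldRep]
  | cons p K ih =>
    intro y hno
    simp only [pvFoldRep, List.foldl_cons]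
    rw [pvRepF_cons_neg _ _ _ _ (hno p (by simp))]
    have hstep : ∀ q ∈ K, ¬ pvTok q.1 <+: c :: pvRepF (pvTok p.1) p.2 y := by
      intro q hq hpre
      by_cases hc : c = '%'
      · subst hc
        simp only [pvTok, List.cons_prefix_cons] at hpre
        obtain ⟨-, hpre⟩ := hpre
        have hrep := hK.2.1 p (by simp)
        have hq' : ('{' :: (q.1 ++ ['}'])) <+: y := by
          apply pvRepF_prefix_rev (pvTok p.1) p.2 (by simp [pvTok]) hrep.1 y _ hpre
          intro d hd hdnew
          have := (hrep.2 d hdnew)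
          rcases List.mem_cons.mp hd with h | h
          · exact this.2.1 h
          · rcases List.mem_append.mp h with h2 | h2
            · exact this.2.2.2 q (by simp [hq]) h2
            · simp only [List.mem_singleton] at h2
              exact this.2.2.1 h2
        exact hno q (by simp [hq]) (List.cons_prefix_cons.mpr ⟨rfl, hq'⟩)
      · simp only [pvTok, List.cons_prefix_cons] at hpre
        exact hc hpre.1.symm
    rw [show (List.foldl (fun f p => pvRepF (pvTok p.1) p.2 f) (c :: pvRepF (pvTok p.1) p.2 y) K)
          = pvFoldRep K (c :: pvRepF (pvTok p.1) p.2 y) from rfl]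
    rw [ih (pvGoodK_cons p K hK) _ hstep]
    rfl


theorem pvTakeWhile_key (k u : List Char) (hk : ∀ c ∈ k, c ≠ '}') :
    (k ++ '}' :: u).takeWhile (fun d => d != '}') = k ∧
    (k ++ '}' :: u).dropWhile (fun d => d != '}') = '}' :: u := by
  induction k with
  | nil => simp
  | cons c k ih =>
    have hc : (c != '}') = true := by simpa using hk c (by simp)
    obtain ⟨h1, h2⟩ := ih (fun d hd => hk d (by simp [hd]))
    constructor
    · simp only [List.cons_append, List.takeWhile_cons, hc, if_true]
      rw [h1]
    · simp only [List.cons_append, List.dropWhile_cons, hc, if_true]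
      exact h2

theorem pvScanB_tok (tbl : PySem.Dict (List Char) (List Char)) (k u : List Char)
    (hk : ∀ c ∈ k, c ≠ '}') (hcont : tbl.contains k = true) :
    pvScanB tbl ('%' :: '{' :: (k ++ '}' :: u)) = tbl.getD k [] ++ pvScanB tbl u := by
  obtain ⟨h1, h2⟩ := pvTakeWhile_key k u hk
  rw [pvScanB]
  simp only [if_pos rfl]
  simp only [h1, h2, hcont, if_true]
  split
  · rename_i tail hdw
    rw [h2] at hdw
    injection hdw with _ h3
    rw [h3]
  · rename_i hne
    exact (hne u h2).elim

theorem pvScanB_cons (tbl : PySem.Dict (List Char) (List Char))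
    (K : List (List Char × List Char))
    (hT2 : ∀ k, tbl.contains k = true → ∃ r, (k, r) ∈ K)
    (c : Char) (y : List Char) (hno : ∀ p ∈ K, ¬ pvTok p.1 <+: c :: y) :
    pvScanB tbl (c :: y) = c :: pvScanB tbl y := by
  rw [pvScanB.eq_def]
  split
  · rename_i heq
    simp at heq
  · rename_i c2 t2 heq
    injection heq with h1 h2
    subst h1
    subst h2
    split
    case isFalse => rfl
    rename_i hc
    split
    · -- y = '{' :: rs
      rename_i rs
      split
      · -- dropWhile rs = '}' :: tail
        rename_i tail hdw
        rw [if_neg ?_]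
        intro hcont
        obtain ⟨r, hmem⟩ := hT2 _ hcont
        refine hno _ hmem ⟨tail, ?_⟩
        have hys : List.takeWhile (fun d => d != '}') rs ++ '}' :: tail = rs := by
          rw [← hdw]; exact List.takeWhile_append_dropWhile
        subst hc
        simpa [pvTok] using hys
      · rfl
    · rfl

theorem pvMain (K : List (List Char × List Char)) (tbl : PySem.Dict (List Char) (List Char))
    (hK : pvGoodK K)
    (hT1 : ∀ k r, (k, r) ∈ K → tbl.contains k = true ∧ tbl.getD k [] = r)
    (hT2 : ∀ k, tbl.contains k = true → ∃ r, (k, r) ∈ K) :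
    ∀ s, pvFoldRep K s = pvScanB tbl s := by
  intro s
  induction hn : s.length using Nat.strong_induction_on generalizing s with
  | _ n ih =>
  subst hn
  by_cases hex : ∃ p ∈ K, pvTok p.1 <+: s
  · obtain ⟨⟨k, r⟩, hmem, u, hu⟩ := hex
    have hlen : u.length < s.length := by
      have := congrArg List.length hu
      simp [pvTok] at this
      omega
    rw [← hu]
    rw [pvFoldRep_tokFront K hK k r hmem u]
    have hkc : ∀ c ∈ k, c ≠ '}' := fun c hc => ((hK.1 (k, r) hmem).2 c hc).1
    have hc := hT1 k r hmem
    rw [show pvTok k ++ u = '%' :: '{' :: (k ++ '}' :: u) by simp [pvTok]]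
    rw [pvScanB_tok tbl k u hkc hc.1, hc.2]
    congr 1
    exact ih u.length hlen u rfl
  · push_neg at hex
    cases s with
    | nil => rw [pvFoldRep_nil, pvScanB]
    | cons c y =>
      rw [pvFoldRep_consFront c K hK y (fun p hp => hex p hp)]
      rw [pvScanB_cons tbl K hT2 c y (fun p hp => hex p hp)]
      congr 1
      exact ih y.length (by simp) y rfl

def pvKofA (capture : Bool) : List (List Char × List Char) :=
  pvFormatKeys.map (fun k => (k, pvMakeKeyRegex capture ((pvKeySpaces.get? k).getD 0)))

theorem pvKofALit_false : pvKofA false =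
  [(['v', 'e', 'r', 's', 'i', 'o', 'n'], ['\\', 'S', '*']),
   (['l', 'v', 'm', '_', 'r', 'o', 'o', 't', '_', 'l', 'v'], ['\\', 'S', '*']),
   (['b', 't', 'r', 'f', 's', '_', 's', 'u', 'b', 'v', 'o', 'l', '_', 'i', 'd'], ['\\', 'S', '*']),
   (['b', 't', 'r', 'f', 's', '_', 's', 'u', 'b', 'v', 'o', 'l', '_', 'p', 'a', 't', 'h'], ['\\', 'S', '*']),
   (['b', 't', 'r', 'f', 's', '_', 's', 'u', 'b', 'v', 'o', 'l', 'u', 'm', 'e'], ['\\', 'S', '*']),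
   (['r', 'o', 'o', 't', '_', 'd', 'e', 'v', 'i', 'c', 'e'], ['\\', 'S', '*']),
   (['r', 'o', 'o', 't', '_', 'o', 'p', 't', 's'], ['\\', 'S', '*', ' ', '?', '\\', 'S', '*'])] := by decide

theorem pvKofALit_true : pvKofA true =
  [(['v', 'e', 'r', 's', 'i', 'o', 'n'], ['(', '\\', 'S', '*', ')']),
   (['l', 'v', 'm', '_', 'r', 'o', 'o', 't', '_', 'l', 'v'], ['(', '\\', 'S', '*', ')']),
   (['b', 't', 'r', 'f', 's', '_', 's', 'u', 'b', 'v', 'o', 'l', '_', 'i', 'd'], ['(', '\\', 'S', '*', ')']),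
   (['b', 't', 'r', 'f', 's', '_', 's', 'u', 'b', 'v', 'o', 'l', '_', 'p', 'a', 't', 'h'], ['(', '\\', 'S', '*', ')']),
   (['b', 't', 'r', 'f', 's', '_', 's', 'u', 'b', 'v', 'o', 'l', 'u', 'm', 'e'], ['(', '\\', 'S', '*', ')']),
   (['r', 'o', 'o', 't', '_', 'd', 'e', 'v', 'i', 'c', 'e'], ['(', '\\', 'S', '*', ')']),
   (['r', 'o', 'o', 't', '_', 'o', 'p', 't', 's'], ['(', '\\', 'S', '*', ' ', '?', '\\', 'S', '*', ')'])] := by decide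

theorem pvGoodK_KofA (capture : Bool) : pvGoodK (pvKofA capture) := by
  unfold pvGoodK
  cases capture
  · rw [pvKofALit_false]; simp
  · rw [pvKofALit_true]; simp

theorem pvT1 (capture : Bool) : ∀ p ∈ pvKofA capture,
    (pvTableB capture).contains p.1 = true ∧ (pvTableB capture).getD p.1 [] = p.2 := by
  cases capture
  · rw [pvKofALit_false]; intro p hp; fin_cases hp <;> exact ⟨by decide, by decide⟩
  · rw [pvKofALit_true]; intro p hp; fin_cases hp <;> exact ⟨by decide, by decide⟩

theorem pvKeysTableB (capture : Bool) : (pvTableB capture).keys = pvFormatKeys := by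
  cases capture <;> decide

theorem pvT2 (capture : Bool) :
    ∀ k, (pvTableB capture).contains k = true → ∃ r, (k, r) ∈ pvKofA capture := by
  intro k hc
  have hk := (PySem.Dict.contains_iff_mem_keys _ _).mp hc
  rw [pvKeysTableB] at hk
  exact ⟨_, List.mem_map.mpr ⟨k, hk, rfl⟩⟩

theorem pvInterNil : ∀ xss : List (List Char), (List.intersperse [] xss).flatten = xss.flatten
  | [] => rfl
  | [a] => by simp
  | a :: b :: t => by
    rw [List.intersperse_cons₂]
    simp only [List.flatten_cons, List.nil_append, pvInterNil (b :: t)]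

theorem pvJoinTail (sS : List Char) : ∀ ws : List (List Char),
    List.foldl (fun out w => out ++ (w ++ sS)) [] ws
      = PySem.Chars.join [] (ws.map (fun w => w ++ sS)) := by
  intro ws
  rw [PySem.List.foldl_append_eq_flatMap (fun w => w ++ sS) ws []]
  rw [PySem.Chars.join]
  rw [List.intercalate, pvInterNil]
  simp [List.flatMap_def]


-- A's guarded replace step equals an unconditional step of the replace model
theorem pvStep_eq (f key r : List Char) :
    (if PySem.Chars.isIn key f then
        PySem.Chars.replace f ('%' :: '{' :: (key ++ ['}'])) r else f)
      = pvRepF (pvTok key) r f := by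
  by_cases h : PySem.Chars.isIn key f = true
  · rw [if_pos h]
    exact pvReplace_eq_repF f _ r (by simp)
  · rw [if_neg h]
    have hni : ¬ key <:+: f := by
      rw [← PySem.Chars.isIn_iff_infix]
      exact h
    have hkey : key <:+: pvTok key := ⟨['%', '{'], ['}'], by simp [pvTok]⟩
    exact (pvRepF_eq_self (pvTok key) r (by simp [pvTok]) f
      (fun htok => hni (hkey.trans htok))).symm

-- A's key loop is the unconditional replace fold over the (key, regex) association
theorem pvFoldA_eq (capture : Bool) (fmt : List Char) :
    pvFormatKeys.foldl
      (fun f key =>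
        if PySem.Chars.isIn key f then
          PySem.Chars.replace f ('%' :: '{' :: (key ++ ['}']))
            (pvMakeKeyRegex capture ((pvKeySpaces.get? key).getD 0))
        else f) fmt
      = pvFoldRep (pvKofA capture) fmt := by
  unfold pvFoldRep pvKofA
  rw [List.foldl_map]
  have hfun : (fun (f key : List Char) =>
      if PySem.Chars.isIn key f then
        PySem.Chars.replace f ('%' :: '{' :: (key ++ ['}']))
          (pvMakeKeyRegex capture ((pvKeySpaces.get? key).getD 0))
      else f)
    = (fun f key =>
        pvRepF (pvTok key) (pvMakeKeyRegex capture ((pvKeySpaces.get? key).getD 0)) f) := by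
    funext f key
    exact pvStep_eq f key _
  rw [hfun]

theorem pvCore_eq (fmt : List Char) (capture : Bool) :
    pvCoreA fmt capture = pvCoreB fmt capture := by
  unfold pvCoreA pvCoreB
  by_cases h : fmt = []
  · rw [if_pos h, if_pos h]
  · rw [if_neg h, if_neg h]
    rw [pvFoldA_eq capture fmt]
    rw [pvMain (pvKofA capture) (pvTableB capture) (pvGoodK_KofA capture)
      (fun k r hm => pvT1 capture (k, r) hm) (pvT2 capture) fmt]
    exact pvJoinTail _ _

-- ===== VERDICT (by name: the statement is the Claim_ definition above) =====
theorem key_regex_from_format_py_spec : Claim_equal_key_regex_from_format_py := by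
  intro fmt capture _
  unfold Spec_key_regex_from_format_py key_regex_from_format_py key_regex_from_format_py_alt
  exact congrArg String.ofList (pvCore_eq fmt.toList capture)
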